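-- pv_equiv track=rewrite | github.com/KingICCrab/pim_mapper | global_partition/partition_state.py | factors_for_dims
-- ===== SOURCE A (Python) =====
-- def factors_for_dims(n, num_dims):
--     """Generate all ways to factor n into num_dims parts."""
--     if num_dims == 1:
--         yield (n,)
--         return
--
--     for i in range(1, n + 1):
--         if n % i == 0:
--             for rest in factors_for_dims(n // i, num_dims - 1):
--                 yield (i,) + rest
-- ===== SOURCE B (Python) =====
-- def factors_for_dims(n, num_dims):
--     """Iterative level-by-level expansion of partial factorizations (worklist instead of recursion)."""
--     if num_dims < 1:
--         return
--     level = [((), n)]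
--     for _ in range(num_dims - 1):
--         level = [(prefix + (d,), rem // d)
--                  for prefix, rem in level
--                  for d in range(1, rem + 1) if rem % d == 0]
--         if not level:
--             return
--     for prefix, rem in level:
--         yield prefix + (rem,)
-- ===== Notes on version B (the rewrite author's own statement) =====
-- stated objective: alternative
-- what changed: Replaces A's depth-first recursion on num_dims with an iterative level-by-level worklist that expands all partial factorizations in one comprehension per level (and yields nothing for num_dims < 1, where A's recursion never terminates).
import Mathlib
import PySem

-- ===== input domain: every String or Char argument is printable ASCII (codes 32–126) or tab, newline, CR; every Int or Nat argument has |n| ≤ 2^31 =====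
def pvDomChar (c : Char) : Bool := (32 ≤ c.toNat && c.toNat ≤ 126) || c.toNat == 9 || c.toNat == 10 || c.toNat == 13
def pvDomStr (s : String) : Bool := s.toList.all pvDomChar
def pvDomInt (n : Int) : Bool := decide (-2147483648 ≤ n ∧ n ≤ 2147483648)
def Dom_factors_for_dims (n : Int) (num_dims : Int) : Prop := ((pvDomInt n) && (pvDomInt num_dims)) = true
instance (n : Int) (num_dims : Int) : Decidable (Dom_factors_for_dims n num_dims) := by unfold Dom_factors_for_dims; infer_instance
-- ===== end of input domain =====

-- B replaces A's depth-first recursion by an iterative level-by-level expansion of partial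
-- factorizations (a worklist loop); same values in the same order. Both Pythons are generators;
-- equivalence is about the fully consumed sequence of yielded tuples.

-- ===== PORT A =====
-- A recurses on num_dims; the recursion is ported with fuel num_dims.toNat, which suffices on
-- every input admitted by Pre_ (outside Pre_ the Python recursion does not terminate).
def factorsAgo : Nat → Int → Int → List (List Int)
  | fuel, n, num_dims =>
    if num_dims = 1 then [[n]]
    else
      match fuel with
      | 0 => []
      | fuel + 1 =>
        (PySem.List.pyRange 1 (n + 1) 1).foldl
          (fun acc i =>
            if PySem.Int.mod n i == 0 then
              acc ++ (factorsAgo fuel (PySem.Int.floordiv n i) (num_dims - 1)).map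
                (fun rest => i :: rest)
            else acc) []

def factors_for_dims (n : Int) (num_dims : Int) : List (List Int) :=
  factorsAgo num_dims.toNat n num_dims

-- ===== PORT B =====
-- one expansion step: the list comprehension in Source B's loop body
def pvStep (level : List (List Int × Int)) : List (List Int × Int) :=
  level.flatMap (fun pr =>
    ((PySem.List.pyRange 1 (pr.2 + 1) 1).filter (fun d => PySem.Int.mod pr.2 d == 0)).map
      (fun d => (pr.1 ++ [d], PySem.Int.floordiv pr.2 d)))

-- Source B's counted loop with its early 'return' on an empty level (the final loop over an empty
-- level yields nothing, so that return is the empty result)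
def pvLoop : Nat → List (List Int × Int) → List (List Int × Int)
  | 0, lv => lv
  | k + 1, lv =>
    let lv' := pvStep lv
    if lv'.isEmpty then lv' else pvLoop k lv'

def factors_for_dims_alt (n : Int) (num_dims : Int) : List (List Int) :=
  if num_dims < 1 then []
  else
    (pvLoop (num_dims - 1).toNat [(([] : List Int), n)]).map (fun pr => pr.1 ++ [pr.2])

-- ===== PRECONDITION & SPEC =====
-- Pre_ excludes exactly the inputs (n ≥ 1 with num_dims ≤ 0) on which A's recursion never
-- reaches its base case and Python raises RecursionError.
def Pre_factors_for_dims (n : Int) (num_dims : Int) : Prop := 1 ≤ num_dims ∨ n ≤ 0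
instance (n : Int) (num_dims : Int) : Decidable (Pre_factors_for_dims n num_dims) := by
  unfold Pre_factors_for_dims; infer_instance
def pvWitness_factors_for_dims : Int × Int := (12, 3)

def Spec_factors_for_dims (n : Int) (num_dims : Int) (out : List (List Int)) : Prop :=
  out = factors_for_dims_alt n num_dims
instance (n : Int) (num_dims : Int) (out : List (List Int)) :
    Decidable (Spec_factors_for_dims n num_dims out) := by
  unfold Spec_factors_for_dims; infer_instance

-- ===== CLAIM (what is proved, stated in full; the proofs are below) =====
def Claim_equal_factors_for_dims : Prop := ∀ (n : Int) (num_dims : Int),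
  Dom_factors_for_dims n num_dims → Pre_factors_for_dims n num_dims →
  Spec_factors_for_dims n num_dims (factors_for_dims n num_dims)
-- ===== LEMMAS AND PROOFS =====

-- close a partial factorization: append the remaining quotient as the last factor
def pvClose (pr : List Int × Int) : List Int := pr.1 ++ [pr.2]

-- the level after k expansion steps starting from remainder n, closed
def pvC (k : Nat) (n : Int) : List (List Int) :=
  (pvStep^[k] [(([] : List Int), n)]).map pvClose

lemma pvStep_nil : pvStep [] = [] := by simp [pvStep]

lemma pvIterate_nil (k : Nat) : pvStep^[k] ([] : List (List Int × Int)) = [] := by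
  induction k with
  | zero => simp
  | succ k ih => rw [Function.iterate_succ_apply, pvStep_nil, ih]

lemma pvLoop_eq (k : Nat) (lv : List (List Int × Int)) : pvLoop k lv = pvStep^[k] lv := by
  induction k generalizing lv with
  | zero => simp [pvLoop]
  | succ k ih =>
    rw [pvLoop, Function.iterate_succ_apply]
    by_cases h : (pvStep lv).isEmpty
    · rw [List.isEmpty_iff] at h
      simp [h, pvIterate_nil]
    · simp only [h, if_false]
      exact ih _

lemma pvStep_append (s t : List (List Int × Int)) : pvStep (s ++ t) = pvStep s ++ pvStep t := by
  simp [pvStep]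

lemma pvIter_append (k : Nat) (s t : List (List Int × Int)) :
    pvStep^[k] (s ++ t) = pvStep^[k] s ++ pvStep^[k] t := by
  induction k generalizing s t with
  | zero => simp
  | succ k ih => rw [Function.iterate_succ_apply, Function.iterate_succ_apply,
      Function.iterate_succ_apply, pvStep_append, ih]

lemma pvIter_nil (k : Nat) : pvStep^[k] ([] : List (List Int × Int)) = [] := by
  induction k with
  | zero => simp
  | succ k ih => rw [Function.iterate_succ_apply]; simp [pvStep, ih]

lemma pvIter_map_close (k : Nat) (D : List Int) (f : Int → List Int × Int) :
    (pvStep^[k] (D.map f)).map pvClose = D.flatMap (fun d => (pvStep^[k] [f d]).map pvClose) := by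
  induction D with
  | nil => simp [pvIter_nil]
  | cons d D ih =>
    have : (d :: D).map f = [f d] ++ D.map f := by simp
    rw [this, pvIter_append, List.map_append, ih, List.flatMap_cons]

lemma pvPrefix (k : Nat) (p : List Int) (n : Int) :
    (pvStep^[k] [(p, n)]).map pvClose = (pvC k n).map (fun xs => p ++ xs) := by
  induction k generalizing p n with
  | zero => simp [pvC, pvClose]
  | succ k ih =>
    rw [Function.iterate_succ_apply, pvC, Function.iterate_succ_apply]
    have hstep : ∀ (q : List Int), pvStep [(q, n)] =
        ((PySem.List.pyRange 1 (n + 1) 1).filter (fun d => PySem.Int.mod n d == 0)).map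
          (fun d => (q ++ [d], PySem.Int.floordiv n d)) := by
      intro q; simp [pvStep]
    rw [hstep p, hstep []]
    rw [pvIter_map_close, pvIter_map_close]
    rw [List.map_flatMap]
    refine List.flatMap_congr (fun d _ => ?_)
    rw [ih, ih]
    simp only [List.map_map, pvC]
    refine List.map_congr_left (fun xs _ => ?_)
    simp [List.append_assoc]

lemma pv_flatMap_if_filter (l : List Int) (p : Int → Bool) (g : Int → List (List Int)) :
    l.flatMap (fun i => if p i then g i else []) = (l.filter p).flatMap g := by
  induction l with
  | nil => simp
  | cons a l ih =>
    by_cases h : p a <;> simp [h, ih]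

lemma pv_foldl_if_append (l : List Int) (p : Int → Bool) (g : Int → List (List Int))
    (acc : List (List Int)) :
    l.foldl (fun acc i => if p i then acc ++ g i else acc) acc =
      acc ++ l.flatMap (fun i => if p i then g i else []) := by
  induction l generalizing acc with
  | nil => simp
  | cons a l ih =>
    by_cases h : p a <;> simp [h, ih]

lemma pvMain (k : Nat) (n : Int) : factorsAgo (k + 1) n ((k : Int) + 1) = pvC k n := by
  induction k generalizing n with
  | zero => simp [factorsAgo, pvC, pvClose]
  | succ k ih =>
    have hne : ¬ (((k + 1 : Nat) : Int) + 1 = 1) := by push_cast; omega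
    rw [factorsAgo]
    simp only [hne, if_false]
    rw [pv_foldl_if_append, List.nil_append,
      pv_flatMap_if_filter _ (fun i => PySem.Int.mod n i == 0)]
    have hsub : ((k + 1 : Nat) : Int) + 1 - 1 = (k : Int) + 1 := by push_cast; ring
    rw [hsub]
    -- right-hand side
    rw [pvC, Function.iterate_succ_apply]
    have hstep : pvStep [(([] : List Int), n)] =
        ((PySem.List.pyRange 1 (n + 1) 1).filter (fun d => PySem.Int.mod n d == 0)).map
          (fun d => (([] : List Int) ++ [d], PySem.Int.floordiv n d)) := by
      simp [pvStep]
    rw [hstep, pvIter_map_close]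
    refine List.flatMap_congr (fun d _ => ?_)
    rw [ih, pvPrefix]
    simp

-- ===== VERDICT (by name: the statement is the Claim_ definition above) =====
theorem factors_for_dims_spec : Claim_equal_factors_for_dims := by
  intro n num_dims _hdom hpre
  unfold Spec_factors_for_dims factors_for_dims factors_for_dims_alt
  by_cases h1 : 1 ≤ num_dims
  · have hk : num_dims = ((num_dims - 1).toNat : Int) + 1 := by omega
    set k := (num_dims - 1).toNat with hkdef
    have htoNat : num_dims.toNat = k + 1 := by omega
    have hlt : ¬ (num_dims < 1) := by omega
    rw [htoNat, if_neg hlt, pvLoop_eq]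
    rw [hk, pvMain, pvC]
    simp [pvClose]
  · have htoNat : num_dims.toNat = 0 := by omega
    have hne : ¬ (num_dims = 1) := by omega
    rw [htoNat, if_pos (by omega : num_dims < 1)]
    rw [factorsAgo]
    simp [hne]
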